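-- pv_equiv track=rewrite | github.com/clemencegoh/Python_Algorithms | HackerRank/level 0/warmups/countingValleys.py | solve
-- ===== SOURCE A (Python) =====
-- def solve(n, s):
--     """
--     Concept:
--         Starting will always be at sea level.
--         Idea is thus to determine how many times the steps bring him back up to sea level from a valley
--         Ignore mountains
--     """
--     state = 0
--     valleyCounter = 0
--     for i in range(n):
--         nextStep = s[i].upper()
--         if nextStep == "U":
--             state -= 1
--             if state == 0:
--                 valleyCounter += 1
--         if nextStep == "D":
--             state += 1
--
--     return valleyCounter
-- ===== SOURCE B (Python) =====
-- def solve(n, s):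
--     deltas = [(-1 if s[i].upper() == 'U' else (1 if s[i].upper() == 'D' else 0))
--               for i in range(n)]
--     alts = [0]
--     for d in deltas:
--         alts.append(alts[-1] + d)
--     return sum(1 for prev, curr in zip(alts, alts[1:]) if prev == 1 and curr == 0)
-- ===== Notes on version B (the rewrite author's own statement) =====
-- stated objective: alternative
-- what changed: B first materialises the delta list and the running-altitude table (prefix sums), then counts adjacent altitude pairs (1,0) in a separate zip pass, instead of A's single fold that threads state and counter together.
import Mathlib
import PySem

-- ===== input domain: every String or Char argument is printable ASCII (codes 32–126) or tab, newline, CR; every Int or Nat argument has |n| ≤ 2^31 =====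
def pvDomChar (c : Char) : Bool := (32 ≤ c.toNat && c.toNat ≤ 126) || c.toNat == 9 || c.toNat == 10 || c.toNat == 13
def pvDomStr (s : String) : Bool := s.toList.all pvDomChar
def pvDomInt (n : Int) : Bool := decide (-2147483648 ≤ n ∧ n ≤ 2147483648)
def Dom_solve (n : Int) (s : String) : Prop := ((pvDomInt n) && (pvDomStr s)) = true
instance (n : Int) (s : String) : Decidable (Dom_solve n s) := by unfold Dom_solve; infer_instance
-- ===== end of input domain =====

-- B builds the altitude table first and counts (1,0) adjacent pairs in a second pass; same O(n) cost, different decomposition.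

-- ===== PORT A =====
-- one iteration of A's loop body on the pair (state, valleyCounter), given s[i].upper()
def solveStep (st : Int × Int) (u : Char) : Int × Int :=
  let st1 := if u = 'U' then
      (st.1 - 1, if st.1 - 1 = 0 then st.2 + 1 else st.2)
    else st
  if u = 'D' then (st1.1 + 1, st1.2) else st1

def solve (n : Int) (s : String) : Int :=
  ((PySem.List.pyRange 0 n 1).foldl
    (fun st i =>
      solveStep st (PySem.Chars.upperChar ((PySem.List.pyGet? s.toList i).getD ' ')))
    (0, 0)).2

-- ===== PORT B =====
-- -1 if s[i].upper() == 'U' else 1 if s[i].upper() == 'D' else 0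
def deltaOf (c : Char) : Int :=
  if PySem.Chars.upperChar c = 'U' then -1
  else if PySem.Chars.upperChar c = 'D' then 1 else 0

def solve_alt (n : Int) (s : String) : Int :=
  let deltas := (PySem.List.pyRange 0 n 1).map
    (fun i => deltaOf ((PySem.List.pyGet? s.toList i).getD ' '))
  let alts := deltas.foldl (fun acc d => acc ++ [acc.getLast! + d]) [0]
  ((alts.zip alts.tail).countP (fun p => p.1 == 1 && p.2 == 0) : Int)

-- ===== PRECONDITION & SPEC =====
-- Pre_: A indexes s[i] for i in range(n), so n > len(s) raises IndexError; exactly those inputs are excluded.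
def Pre_solve (n : Int) (s : String) : Prop := n ≤ (s.toList.length : Int)
instance (n : Int) (s : String) : Decidable (Pre_solve n s) := by unfold Pre_solve; infer_instance
def pvWitness_solve : Int × String := (8, "UDDDUDUU")

def Spec_solve (n : Int) (s : String) (out : Int) : Prop := out = solve_alt n s
instance (n : Int) (s : String) (out : Int) : Decidable (Spec_solve n s out) := by unfold Spec_solve; infer_instance

-- ===== CLAIM (what is proved, stated in full; the proofs are below) =====
def Claim_equal_solve : Prop := ∀ (n : Int) (s : String), Dom_solve n s → Pre_solve n s → Spec_solve n s (solve n s)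

-- ===== LEMMAS AND PROOFS =====

-- the count both programs compute, expressed as a recursion over the delta list
def cntN (st : Int) : List Int → Nat
  | [] => 0
  | d :: ds => (if st = 1 ∧ st + d = 0 then 1 else 0) + cntN (st + d) ds

-- B's altitude table as a scan
def scanAlt (a : Int) : List Int → List Int
  | [] => [a]
  | d :: ds => a :: scanAlt (a + d) ds

theorem scanAlt_head (a : Int) (ds : List Int) : ∃ t, scanAlt a ds = a :: t := by
  cases ds <;> exact ⟨_, rfl⟩

theorem getLast!_append_singleton (l : List Int) (x : Int) : (l ++ [x]).getLast! = x := by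
  induction l with
  | nil => rfl
  | cons a t ih => simp_all [List.getLast!, List.getLast]

theorem build_eq_scan (ds : List Int) (pre : List Int) (a : Int) :
    ds.foldl (fun acc d => acc ++ [acc.getLast! + d]) (pre ++ [a]) = pre ++ scanAlt a ds := by
  induction ds generalizing pre a with
  | nil => simp [scanAlt]
  | cons d ds ih =>
    simp only [List.foldl_cons, scanAlt]
    rw [getLast!_append_singleton]
    simpa using ih (pre ++ [a]) (a + d)

theorem countPairs_scan (a : Int) (ds : List Int) :
    ((scanAlt a ds).zip (scanAlt a ds).tail).countP (fun p => p.1 == 1 && p.2 == 0) = cntN a ds := by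
  induction ds generalizing a with
  | nil => simp [scanAlt, cntN]
  | cons d ds ih =>
    obtain ⟨t, ht⟩ := scanAlt_head (a + d) ds
    have ih' := ih (a + d)
    rw [ht] at ih'
    simp only [List.tail_cons] at ih'
    simp only [scanAlt, ht, List.tail_cons, List.zip_cons_cons, List.countP_cons, cntN, ih']
    by_cases h : a = 1 ∧ a + d = 0
    · simp [h.1]; omega
    · have hb : (a == 1 && (a + d) == 0) = false := by
        by_cases h1 : a = 1 <;> simp_all
      simp [hb, h]

theorem loopA_eq (f : Int → Char) (l : List Int) (st vc : Int) :
    (l.foldl (fun p i => solveStep p (PySem.Chars.upperChar (f i))) (st, vc)).2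
      = vc + (cntN st (l.map (fun i => deltaOf (f i))) : Int) := by
  induction l generalizing st vc with
  | nil => simp [cntN]
  | cons i l ih =>
    simp only [List.foldl_cons, List.map_cons, cntN]
    by_cases hU : PySem.Chars.upperChar (f i) = 'U'
    · have hstep : solveStep (st, vc) (PySem.Chars.upperChar (f i))
          = (st - 1, if st - 1 = 0 then vc + 1 else vc) := by simp [solveStep, hU]
      have hd : deltaOf (f i) = -1 := by simp [deltaOf, hU]
      rw [hstep, ih, hd, show st + (-1 : Int) = st - 1 from by ring]
      by_cases hz : st - 1 = 0
      · have h1 : st = 1 := by omega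
        simp [h1]
        omega
      · have hc : ¬ (st = 1 ∧ st - 1 = 0) := by omega
        simp [hz]
    · by_cases hD : PySem.Chars.upperChar (f i) = 'D'
      · have hstep : solveStep (st, vc) (PySem.Chars.upperChar (f i)) = (st + 1, vc) := by
          simp [solveStep, hD]
        have hd : deltaOf (f i) = 1 := by simp [deltaOf, hD]
        have hc : ¬ (st = 1 ∧ st + (1 : Int) = 0) := by omega
        rw [hstep, ih, hd]
        simp [hc]
      · have hstep : solveStep (st, vc) (PySem.Chars.upperChar (f i)) = (st, vc) := by
          simp [solveStep, hD, hU]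
        have hd : deltaOf (f i) = 0 := by simp [deltaOf, hD, hU]
        have hc : (if st = 1 ∧ st + (0 : Int) = 0 then 1 else 0) = 0 := by
          simp; omega
        rw [hstep, ih, hd, hc]
        simp

-- ===== VERDICT (by name: the statement is the Claim_ definition above) =====
theorem solve_spec : Claim_equal_solve := by
  intro n s _ _
  unfold Spec_solve solve solve_alt
  dsimp only
  rw [show ([0] : List Int) = [] ++ [0] from rfl, build_eq_scan, List.nil_append, countPairs_scan,
      loopA_eq (fun i => (PySem.List.pyGet? s.toList i).getD ' ')]
  simp
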